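-- pv_equiv track=rewrite | github.com/r09g/svpet | src/pet_state_machine.py | calculate_manhattan_path
-- ===== SOURCE A (Python) =====
-- from typing import Tuple, Optional
--
-- def calculate_manhattan_path(start_pos: Tuple[int, int], target_pos: Tuple[int, int]) -> list[Tuple[int, int]]:
--     """Calculate Manhattan path with minimum turns from start to target position"""
--     start_x, start_y = start_pos
--     end_x, end_y = target_pos
--
--     path = [start_pos]
--
--     # Horizontal first
--     if start_x != end_x:
--         step = 1 if end_x > start_x else -1
--         for x in range(start_x + step, end_x + step, step):
--             path.append((x, start_y))
--
--     if start_y != end_y: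
--         step = 1 if end_y > start_y else -1
--         for y in range(start_y + step, end_y + step, step):
--             path.append((end_x, y))
--     return path
-- ===== SOURCE B (Python) =====
-- def calculate_manhattan_path(start_pos, target_pos):
--     """Single-cursor incremental walk: horizontal until x-aligned, then vertical."""
--     cx, cy = start_pos
--     ex, ey = target_pos
--     sx = 1 if ex > cx else -1
--     sy = 1 if ey > cy else -1
--     path = [start_pos]
--     while cx != ex or cy != ey:
--         if cx != ex:
--             cx += sx
--         else:
--             cy += sy
--         path.append((cx, cy))
--     return path
-- ===== Notes on version B (the rewrite author's own statement) =====
-- stated objective: alternative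
-- what changed: Replaced the two sign-dependent range() loops that append precomputed coordinates with a single while loop that walks one cursor step by step (horizontal until x-aligned, then vertical), appending the cursor after each move.
import Mathlib
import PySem

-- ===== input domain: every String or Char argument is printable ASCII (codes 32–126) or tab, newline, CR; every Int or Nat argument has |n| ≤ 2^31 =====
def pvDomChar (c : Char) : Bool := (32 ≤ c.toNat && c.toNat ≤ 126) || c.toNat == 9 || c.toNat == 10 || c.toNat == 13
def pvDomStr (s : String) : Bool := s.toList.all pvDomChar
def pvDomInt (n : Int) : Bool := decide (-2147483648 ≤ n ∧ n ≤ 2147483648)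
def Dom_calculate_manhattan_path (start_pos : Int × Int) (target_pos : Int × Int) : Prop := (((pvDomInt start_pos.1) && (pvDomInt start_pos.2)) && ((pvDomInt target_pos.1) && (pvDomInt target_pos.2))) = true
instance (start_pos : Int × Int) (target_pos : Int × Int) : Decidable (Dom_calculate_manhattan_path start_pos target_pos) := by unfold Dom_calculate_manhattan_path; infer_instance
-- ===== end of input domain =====

-- B changes the decomposition only: one incremental cursor walk instead of two range loops; same cost.
-- ===== PORT A =====
def calculate_manhattan_path (start_pos : Int × Int) (target_pos : Int × Int) : List (Int × Int) :=
  let start_x := start_pos.1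
  let start_y := start_pos.2
  let end_x := target_pos.1
  let end_y := target_pos.2
  let path := [start_pos]
  let path :=
    if start_x ≠ end_x then
      let step : Int := if end_x > start_x then 1 else -1
      path ++ (PySem.List.pyRange (start_x + step) (end_x + step) step).map (fun x => (x, start_y))
    else path
  let path :=
    if start_y ≠ end_y then
      let step : Int := if end_y > start_y then 1 else -1
      path ++ (PySem.List.pyRange (start_y + step) (end_y + step) step).map (fun y => (end_x, y))
    else path
  path

-- ===== PORT B =====
-- the while loop of Source B, with fuel = remaining Manhattan distance (each iteration decreases it by 1)
def pvWalk (ex ey sx sy : Int) (cx cy : Int) : Nat → List (Int × Int)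
  | 0 => []
  | n + 1 =>
    if cx ≠ ex then
      (cx + sx, cy) :: pvWalk ex ey sx sy (cx + sx) cy n
    else
      (cx, cy + sy) :: pvWalk ex ey sx sy cx (cy + sy) n

def calculate_manhattan_path_alt (start_pos : Int × Int) (target_pos : Int × Int) : List (Int × Int) :=
  let cx := start_pos.1
  let cy := start_pos.2
  let ex := target_pos.1
  let ey := target_pos.2
  let sx : Int := if ex > cx then 1 else -1
  let sy : Int := if ey > cy then 1 else -1
  start_pos :: pvWalk ex ey sx sy cx cy ((ex - cx).natAbs + (ey - cy).natAbs)

-- ===== PRECONDITION & SPEC =====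
def Spec_calculate_manhattan_path (start_pos : Int × Int) (target_pos : Int × Int) (out : List (Int × Int)) : Prop := out = calculate_manhattan_path_alt start_pos target_pos
instance (start_pos : Int × Int) (target_pos : Int × Int) (out : List (Int × Int)) : Decidable (Spec_calculate_manhattan_path start_pos target_pos out) := by unfold Spec_calculate_manhattan_path; infer_instance

-- ===== CLAIM (what is proved, stated in full; the proofs are below) =====
def Claim_equal_calculate_manhattan_path : Prop := ∀ (start_pos : Int × Int) (target_pos : Int × Int), Dom_calculate_manhattan_path start_pos target_pos → Spec_calculate_manhattan_path start_pos target_pos (calculate_manhattan_path start_pos target_pos)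

-- ===== LEMMAS AND PROOFS =====

theorem pvWalk_vert_pos (ex ey sx : Int) : ∀ (n : Nat) (cy : Int), cy + n = ey →
    pvWalk ex ey sx 1 ex cy n = (PySem.List.pyRange (cy + 1) (ey + 1) 1).map (fun y => (ex, y)) := by
  intro n
  induction n with
  | zero =>
    intro cy h
    simp at h
    subst h
    rw [PySem.List.pyRange_one_eq_nil (by omega)]
    simp [pvWalk]
  | succ n ih =>
    intro cy h
    rw [PySem.List.pyRange_one_cons (by omega)]
    simp only [pvWalk, ne_eq, ite_not]
    rw [if_true]
    have := ih (cy + 1) (by push_cast at h ⊢; omega)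
    rw [this]
    simp [List.map_cons]

theorem pvWalk_vert_neg (ex ey sx : Int) : ∀ (n : Nat) (cy : Int), cy - n = ey →
    pvWalk ex ey sx (-1) ex cy n = (PySem.List.pyRange (cy - 1) (ey - 1) (-1)).map (fun y => (ex, y)) := by
  intro n
  induction n with
  | zero =>
    intro cy h
    simp at h
    subst h
    rw [PySem.List.pyRange_neg_one_eq_nil (by omega)]
    simp [pvWalk]
  | succ n ih =>
    intro cy h
    rw [PySem.List.pyRange_neg_one_cons (by omega)]
    simp only [pvWalk, ne_eq, ite_not]
    rw [if_true]
    have := ih (cy - 1) (by push_cast at h ⊢; omega)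
    rw [show cy + -1 = cy - 1 by ring, this]
    simp [List.map_cons]

theorem pvWalk_horiz_pos (ex ey sy : Int) : ∀ (n : Nat) (m : Nat) (cx cy : Int), cx + n = ex →
    pvWalk ex ey 1 sy cx cy (n + m)
      = (PySem.List.pyRange (cx + 1) (ex + 1) 1).map (fun x => (x, cy)) ++ pvWalk ex ey 1 sy ex cy m := by
  intro n
  induction n with
  | zero =>
    intro m cx cy h
    simp at h
    subst h
    rw [PySem.List.pyRange_one_eq_nil (by omega)]
    simp
  | succ n ih =>
    intro m cx cy h
    have hne : cx ≠ ex := by push_cast at h; omega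
    rw [PySem.List.pyRange_one_cons (by push_cast at h; omega)]
    have hstep : (n + 1) + m = ((n + m) + 1 : Nat) := by omega
    rw [hstep]
    simp only [pvWalk, ne_eq, ite_not]
    rw [if_neg hne]
    have := ih m (cx + 1) cy (by push_cast at h ⊢; omega)
    rw [this]
    simp [List.map_cons]

theorem pvWalk_horiz_neg (ex ey sy : Int) : ∀ (n : Nat) (m : Nat) (cx cy : Int), cx - n = ex →
    pvWalk ex ey (-1) sy cx cy (n + m)
      = (PySem.List.pyRange (cx - 1) (ex - 1) (-1)).map (fun x => (x, cy)) ++ pvWalk ex ey (-1) sy ex cy m := by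
  intro n
  induction n with
  | zero =>
    intro m cx cy h
    simp at h
    subst h
    rw [PySem.List.pyRange_neg_one_eq_nil (by omega)]
    simp
  | succ n ih =>
    intro m cx cy h
    have hne : cx ≠ ex := by push_cast at h; omega
    rw [PySem.List.pyRange_neg_one_cons (by push_cast at h; omega)]
    have hstep : (n + 1) + m = ((n + m) + 1 : Nat) := by omega
    rw [hstep]
    simp only [pvWalk, ne_eq, ite_not]
    rw [if_neg hne]
    have := ih m (cx - 1) cy (by push_cast at h ⊢; omega)
    rw [show cx + -1 = cx - 1 by ring, this]
    simp [List.map_cons]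

-- ===== VERDICT (by name: the statement is the Claim_ definition above) =====
theorem calculate_manhattan_path_spec : Claim_equal_calculate_manhattan_path := by
  intro ⟨sx, sy⟩ ⟨ex, ey⟩ _
  unfold Spec_calculate_manhattan_path calculate_manhattan_path calculate_manhattan_path_alt
  simp only [ne_eq, ite_not]
  split_ifs with h1 h2 h3 h4 h5 h6 h7 h8 h9 h10 h11 h12 h13 h14
  · exact absurd h3 (by omega)
  · exact absurd h3 (by omega)
  · exact absurd h5 (by omega)
  · rw [show (ex - sx).natAbs + (ey - sy).natAbs = 0 by omega]
    simp [pvWalk]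
  · exact absurd h7 (by omega)
  · rw [show (ex - sx).natAbs + (ey - sy).natAbs = (ex - sx).natAbs + 0 by omega]
    rw [pvWalk_horiz_pos ex ey (-1) ((ex - sx).natAbs) 0 sx sy (by omega)]
    simp [pvWalk]
  · exact absurd h8 (by omega)
  · rw [show (ex - sx).natAbs + (ey - sy).natAbs = (ex - sx).natAbs + 0 by omega]
    rw [pvWalk_horiz_neg ex ey (-1) ((ex - sx).natAbs) 0 sx sy (by omega)]
    simp [pvWalk, show sx + (-1 : Int) = sx - 1 by ring, show ex + (-1 : Int) = ex - 1 by ring]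
  · exact absurd h11 (by omega)
  · rw [h9]
    rw [show (ex - ex).natAbs + (ey - sy).natAbs = (ey - sy).natAbs by omega]
    rw [pvWalk_vert_pos ex ey (-1) ((ey - sy).natAbs) sy (by omega)]
    simp
  · exact absurd h12 (by omega)
  · rw [h9]
    rw [show (ex - ex).natAbs + (ey - sy).natAbs = (ey - sy).natAbs by omega]
    rw [pvWalk_vert_neg ex ey (-1) ((ey - sy).natAbs) sy (by omega)]
    simp [show sy + (-1 : Int) = sy - 1 by ring, show ey + (-1 : Int) = ey - 1 by ring]
  · rw [pvWalk_horiz_pos ex ey 1 ((ex - sx).natAbs) ((ey - sy).natAbs) sx sy (by omega)]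
    rw [pvWalk_vert_pos ex ey 1 ((ey - sy).natAbs) sy (by omega)]
    simp
  · rw [pvWalk_horiz_pos ex ey (-1) ((ex - sx).natAbs) ((ey - sy).natAbs) sx sy (by omega)]
    rw [pvWalk_vert_neg ex ey 1 ((ey - sy).natAbs) sy (by omega)]
    simp [show sy + (-1 : Int) = sy - 1 by ring, show ey + (-1 : Int) = ey - 1 by ring]
  · rw [pvWalk_horiz_neg ex ey 1 ((ex - sx).natAbs) ((ey - sy).natAbs) sx sy (by omega)]
    rw [pvWalk_vert_pos ex ey (-1) ((ey - sy).natAbs) sy (by omega)]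
    simp [show sx + (-1 : Int) = sx - 1 by ring, show ex + (-1 : Int) = ex - 1 by ring]
  · rw [pvWalk_horiz_neg ex ey (-1) ((ex - sx).natAbs) ((ey - sy).natAbs) sx sy (by omega)]
    rw [pvWalk_vert_neg ex ey (-1) ((ey - sy).natAbs) sy (by omega)]
    simp [show sx + (-1 : Int) = sx - 1 by ring, show ex + (-1 : Int) = ex - 1 by ring,
          show sy + (-1 : Int) = sy - 1 by ring, show ey + (-1 : Int) = ey - 1 by ring]
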